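-- pv_equiv track=rewrite | github.com/kognate/skiplist | FirstSteps.py | consolidate_found_canines
-- ===== SOURCE A (Python) =====
-- def consolidate_found_canines(payload):
--     counter = {}
--     for dog in payload.get('canines',[]):
--         sub = counter.setdefault(dog.get('type', 'Unknown'), {})
--         age_item = dog.get('age','Unknown')
--         counts = sub.setdefault(age_item, 0)
--         counts = counts + 1
--         sub[age_item] = counts
--     acc = []
--     for k in counter.keys():
--         for j in counter[k].keys():
--             acc.append((k,j,counter[k][j]))
--     return acc
-- ===== SOURCE B (Python) =====
-- def consolidate_found_canines(payload):
--     # Dict-free selection-partition: repeatedly split off the first remaining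
--     # type's block from a flat (type, age) pair list; counts come from length
--     # differences when the block is in turn partitioned by its first age.
--     pairs = [(dog.get('type', 'Unknown'), dog.get('age', 'Unknown'))
--              for dog in payload.get('canines', [])]
--     out = []
--     while pairs:
--         t = pairs[0][0]
--         ages = [age for (ty, age) in pairs if ty == t]
--         pairs = [p for p in pairs if p[0] != t]
--         while ages:
--             a = ages[0]
--             rest = [x for x in ages[1:] if x != a]
--             out.append((t, a, len(ages) - len(rest)))
--             ages = rest
--     return out
-- ===== Notes on version B (the rewrite author's own statement) =====
-- stated objective: alternative
-- what changed: B uses no dictionary at all: it flattens to a (type, age) pair list, then repeatedly partitions off the first remaining type's block and counts each age by list-length differences (selection-style grouping), instead of A's single pass maintaining a nested dict of running counts.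
import Mathlib
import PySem

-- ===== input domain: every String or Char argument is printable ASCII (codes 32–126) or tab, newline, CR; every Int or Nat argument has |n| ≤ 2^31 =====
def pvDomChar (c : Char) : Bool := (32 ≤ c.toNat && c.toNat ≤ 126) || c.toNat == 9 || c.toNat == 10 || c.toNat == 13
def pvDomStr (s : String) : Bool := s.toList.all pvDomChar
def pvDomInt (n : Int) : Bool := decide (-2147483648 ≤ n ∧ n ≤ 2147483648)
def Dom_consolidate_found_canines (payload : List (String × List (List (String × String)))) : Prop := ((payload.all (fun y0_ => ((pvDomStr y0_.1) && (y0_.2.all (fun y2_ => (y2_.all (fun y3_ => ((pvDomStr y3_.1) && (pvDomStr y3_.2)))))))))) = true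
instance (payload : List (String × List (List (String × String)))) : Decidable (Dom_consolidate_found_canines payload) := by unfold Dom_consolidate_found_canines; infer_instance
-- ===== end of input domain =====

-- B consolidates without any dictionary: it repeatedly partitions the flat (type, age)
-- pair list on the first remaining type and counts ages by list-length differences
-- (alternative decomposition; not claimed faster).


-- dict.get(k, dflt) on an association list (first match), shared by both ports
def pyAGetD {α : Type} (l : List (String × α)) (k : String) (dflt : α) : α :=
  ((l.find? (fun p => p.1 == k)).map (·.2)).getD dflt

-- ===== PORT A =====
def consolidate_found_canines (payload : List (String × List (List (String × String)))) : List (String × String × Int) :=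
  -- counter: nested dict of running counts (setdefault + in-place update), then the
  -- double loop appending (k, j, counter[k][j]) tuples
  ((pyAGetD payload "canines" []).foldl
      (fun c dog =>
        c.modify (pyAGetD dog "type" "Unknown") PySem.Dict.empty
          (fun sub => sub.modify (pyAGetD dog "age" "Unknown") 0 (· + 1)))
      PySem.Dict.empty).items.foldl
    (fun acc kv => kv.2.items.foldl (fun a2 jv => a2 ++ [(kv.1, jv.1, jv.2)]) acc) []

-- ===== PORT B =====
-- inner while loop: split the age block on its first age; count = length difference
def pvAgeLoop (t : String) (ages : List String) (out : List (String × String × Int)) : List (String × String × Int) :=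
  match ages with
  | [] => out
  | a :: tl =>
    let rest := tl.filter (fun x => !(x == a))
    pvAgeLoop t rest (out ++ [(t, a, ((tl.length : Int) + 1 - (rest.length : Int)))])
termination_by ages.length
decreasing_by
  refine Nat.lt_succ_of_le ?_
  rw [List.length_unattach]
  exact le_of_le_of_eq (List.length_filter_le _ _) List.length_attach

-- outer while loop: split the pair list on the first remaining type
def pvTypeLoop (ps : List (String × String)) (out : List (String × String × Int)) : List (String × String × Int) :=
  match ps with
  | [] => out
  | q :: tl =>
    let ages := ((q :: tl).filter (fun r => r.1 == q.1)).map (·.2)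
    let rest := (q :: tl).filter (fun r => !(r.1 == q.1))
    pvTypeLoop rest (pvAgeLoop q.1 ages out)
termination_by ps.length
decreasing_by
  have h1 : ((q :: tl).filter (fun r => !(r.1 == q.1))) = tl.filter (fun r => !(r.1 == q.1)) := by
    simp
  calc ((q :: tl).filter (fun r => !(r.1 == q.1))).length
      = (tl.filter (fun r => !(r.1 == q.1))).length := by rw [h1]
    _ ≤ tl.length := List.length_filter_le _ _
    _ < (q :: tl).length := by simp

def consolidate_found_canines_alt (payload : List (String × List (List (String × String)))) : List (String × String × Int) :=
  pvTypeLoop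
    ((pyAGetD payload "canines" []).map
      (fun dog => (pyAGetD dog "type" "Unknown", pyAGetD dog "age" "Unknown")))
    []

-- ===== PRECONDITION & SPEC =====
def Spec_consolidate_found_canines (payload : List (String × List (List (String × String)))) (out : List (String × String × Int)) : Prop := out = consolidate_found_canines_alt payload
instance (payload : List (String × List (List (String × String)))) (out : List (String × String × Int)) : Decidable (Spec_consolidate_found_canines payload out) := by unfold Spec_consolidate_found_canines; infer_instance

-- ===== CLAIM (what is proved, stated in full; the proofs are below) =====
def Claim_equal_consolidate_found_canines : Prop := ∀ (payload : List (String × List (List (String × String)))), Dom_consolidate_found_canines payload → Spec_consolidate_found_canines payload (consolidate_found_canines payload)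

-- ===== LEMMAS AND PROOFS =====

-- first-occurrence dedup, recursively (proof-side canonical form)
def pvDdp : List String → List String
  | [] => []
  | a :: tl => a :: pvDdp (tl.filter (fun x => !(x == a)))
termination_by l => l.length
decreasing_by
  refine Nat.lt_succ_of_le ?_
  rw [List.length_unattach]
  exact le_of_le_of_eq (List.length_filter_le _ _) List.length_attach

-- canonical grouped output of a pair list
def pvAForm (ps : List (String × String)) : List (String × String × Int) :=
  (pvDdp (ps.map (·.1))).flatMap (fun t =>
    (pvDdp ((ps.filter (fun q => q.1 == t)).map (·.2))).map
      (fun a => (t, a, (((ps.filter (fun q => q.1 == t)).map (·.2)).count a : Int))))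

-- clean equation lemmas for the worker loops
theorem pvDdp_nil : pvDdp [] = [] := by rw [pvDdp.eq_def]

theorem pvDdp_cons (a : String) (l : List String) :
    pvDdp (a :: l) = a :: pvDdp (l.filter (fun x => !(x == a))) := by rw [pvDdp.eq_def]

theorem pvAgeLoop_nil (t : String) (out : List (String × String × Int)) :
    pvAgeLoop t [] out = out := by rw [pvAgeLoop.eq_def]

theorem pvAgeLoop_cons (t a : String) (tl : List String) (out : List (String × String × Int)) :
    pvAgeLoop t (a :: tl) out
      = pvAgeLoop t (tl.filter (fun x => !(x == a)))
          (out ++ [(t, a, ((tl.length : Int) + 1 - (((tl.filter (fun x => !(x == a)))).length : Int)))]) := by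
  rw [pvAgeLoop.eq_def]

theorem pvTypeLoop_nil (out : List (String × String × Int)) :
    pvTypeLoop [] out = out := by rw [pvTypeLoop.eq_def]

theorem pvTypeLoop_cons (q : String × String) (tl : List (String × String))
    (out : List (String × String × Int)) :
    pvTypeLoop (q :: tl) out
      = pvTypeLoop ((q :: tl).filter (fun r => !(r.1 == q.1)))
          (pvAgeLoop q.1 (((q :: tl).filter (fun r => r.1 == q.1)).map (·.2)) out) := by
  rw [pvTypeLoop.eq_def]

theorem mem_pvDdp {x : String} : ∀ {l : List String}, x ∈ pvDdp l → x ∈ l := by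
  intro l
  induction hn : l.length using Nat.strong_induction_on generalizing l with
  | _ n ih =>
    match l with
    | [] => intro h; rw [pvDdp_nil] at h; cases h
    | a :: tl =>
      intro h
      rw [pvDdp_cons] at h
      rcases List.mem_cons.mp h with h | h
      · exact h ▸ List.mem_cons_self
      · have hlt : (tl.filter (fun x => !(x == a))).length < n := by
          subst hn
          exact Nat.lt_succ_of_le (List.length_filter_le _ _)
        exact List.mem_cons_of_mem a
          (List.mem_of_mem_filter (ih _ hlt rfl h))

theorem pv_flatMap_congr {α β : Type} {l : List α} {f g : α → List β}
    (h : ∀ x ∈ l, f x = g x) : l.flatMap f = l.flatMap g := by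
  induction l with
  | nil => rfl
  | cons a tl ih =>
    simp only [List.flatMap_cons, h a List.mem_cons_self,
      ih (fun x hx => h x (List.mem_cons_of_mem a hx))]

theorem pv_update_eq_ddp : ∀ (n : Nat) (l : List String), l.length ≤ n → ∀ (s : List String),
    PySem.Set.update s l = s ++ pvDdp (l.filter (fun x => !s.contains x)) := by
  intro n
  induction n with
  | zero =>
    intro l hl s
    rw [List.length_eq_zero_iff.mp (Nat.le_zero.mp hl)]
    simp [PySem.Set.update, pvDdp_nil]
  | succ n ih =>
    intro l hl s
    match l with
    | [] => simp [PySem.Set.update, pvDdp_nil]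
    | a :: tl =>
      have hup : PySem.Set.update s (a :: tl) = PySem.Set.update (PySem.Set.add s a) tl := rfl
      have htl : tl.length ≤ n := Nat.le_of_succ_le_succ hl
      by_cases hs : a ∈ s
      · have hadd : PySem.Set.add s a = s := by simp [PySem.Set.add, hs]
        have hfil : (a :: tl).filter (fun x => !s.contains x) = tl.filter (fun x => !s.contains x) := by
          simp [hs]
        rw [hup, hadd, hfil, ih tl htl s]
      · have hadd : PySem.Set.add s a = s ++ [a] := by simp [PySem.Set.add, hs]
        have hfil : (a :: tl).filter (fun x => !s.contains x)
            = a :: tl.filter (fun x => !s.contains x) := by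
          simp [hs]
        have hcomb : tl.filter (fun x => !(s ++ [a]).contains x)
            = (tl.filter (fun x => !s.contains x)).filter (fun x => !(x == a)) := by
          rw [List.filter_filter]
          apply List.filter_congr
          intro x _
          simp [Bool.beq_eq_decide_eq, Bool.and_comm]
        rw [hup, hadd, ih tl htl (s ++ [a]), hfil, pvDdp_cons, ← hcomb]
        simp

theorem pv_ofList_eq_ddp (l : List String) : PySem.Set.ofList l = pvDdp l := by
  have h : PySem.Set.ofList l = PySem.Set.update [] l := rfl
  rw [h, pv_update_eq_ddp l.length l le_rfl []]
  simp

theorem pvAgeLoop_spec (t : String) : ∀ (n : Nat) (ages : List String), ages.length ≤ n →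
    ∀ (out : List (String × String × Int)),
    pvAgeLoop t ages out = out ++ (pvDdp ages).map (fun a => (t, a, (ages.count a : Int))) := by
  intro n
  induction n with
  | zero =>
    intro ages h out
    rw [List.length_eq_zero_iff.mp (Nat.le_zero.mp h)]
    simp [pvAgeLoop_nil, pvDdp_nil]
  | succ n ih =>
    intro ages h out
    match ages with
    | [] => simp [pvAgeLoop_nil, pvDdp_nil]
    | a :: tl =>
      rw [pvAgeLoop_cons]
      have hrest : (tl.filter (fun x => !(x == a))).length ≤ n :=
        le_trans (List.length_filter_le _ _) (Nat.le_of_succ_le_succ h)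
      rw [ih _ hrest, pvDdp_cons]
      simp only [List.map_cons, List.append_assoc, List.cons_append,
        List.nil_append]
      congr 2
      · -- head count: tl.length + 1 - rest.length = count a (a :: tl)
        have hsplit : (tl.filter (fun x => x == a)).length
            + (tl.filter (fun x => !(x == a))).length = tl.length :=
          (List.length_eq_length_filter_add (fun x : String => x == a)).symm
        have hcnt : List.count a (a :: tl) = (tl.filter (fun x => x == a)).length + 1 := by
          rw [List.count_cons]
          simp [List.count_eq_length_filter]
        have h3 : ((tl.length : Int) + 1 - ((tl.filter (fun x => !(x == a))).length : Int))
            = (List.count a (a :: tl) : Int) := by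
          rw [hcnt]
          push_cast
          omega
        exact congrArg (fun z : Int => (t, a, z)) h3
      · -- tail: counts agree on elements of the filtered rest
        apply List.map_congr_left
        intro b hb
        have hbmem : b ∈ tl.filter (fun x => !(x == a)) := mem_pvDdp hb
        have hba : (b == a) = false := by
          have := (List.mem_filter.mp hbmem).2
          simpa using this
        have h1 : (tl.filter (fun x => !(x == a))).count b = tl.count b :=
          List.count_filter (by simp [hba])
        have h2 : (a :: tl).count b = tl.count b := by
          have : (a == b) = false := by
            rcases beq_eq_false_iff_ne.mp hba with hne
            exact beq_eq_false_iff_ne.mpr (fun e => hne e.symm)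
          simp [List.count_cons, this]
        rw [h1, h2]

theorem pvTypeLoop_spec : ∀ (n : Nat) (ps : List (String × String)), ps.length ≤ n →
    ∀ (out : List (String × String × Int)),
    pvTypeLoop ps out = out ++ pvAForm ps := by
  intro n
  induction n with
  | zero =>
    intro ps h out
    rw [List.length_eq_zero_iff.mp (Nat.le_zero.mp h)]
    simp [pvTypeLoop_nil, pvAForm, pvDdp_nil]
  | succ n ih =>
    intro ps h out
    match ps with
    | [] => simp [pvTypeLoop_nil, pvAForm, pvDdp_nil]
    | q :: tl =>
      rw [pvTypeLoop_cons]
      have hhead : ((q :: tl).filter (fun r => !(r.1 == q.1))) = tl.filter (fun r => !(r.1 == q.1)) := by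
        simp
      have hlen : ((q :: tl).filter (fun r => !(r.1 == q.1))).length ≤ n := by
        rw [hhead]
        exact le_trans (List.length_filter_le _ _) (Nat.le_of_succ_le_succ h)
      rw [ih _ hlen]
      rw [pvAgeLoop_spec q.1 _ _ le_rfl]
      rw [List.append_assoc]
      congr 1
      -- pvAForm (q :: tl) = head block ++ pvAForm of the filtered rest
      have hmapfst : (q :: tl).map (·.1) = q.1 :: tl.map (·.1) := by simp
      have hddp : pvDdp ((q :: tl).map (·.1))
          = q.1 :: pvDdp (((q :: tl).filter (fun r => !(r.1 == q.1))).map (·.1)) := by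
        rw [hmapfst, pvDdp_cons, hhead]
        congr 1
        rw [List.filter_map]
        rfl
      conv_rhs => rw [pvAForm, hddp, List.flatMap_cons]
      congr 1
      rw [pvAForm]
      apply pv_flatMap_congr
      intro t' ht'
      have ht'mem : t' ∈ ((q :: tl).filter (fun r => !(r.1 == q.1))).map (·.1) := mem_pvDdp ht'
      have ht'ne : (t' == q.1) = false := by
        rcases List.mem_map.mp ht'mem with ⟨r, hr, hrt⟩
        have := (List.mem_filter.mp hr).2
        subst hrt
        simpa using this
      have hfil : (q :: tl).filter (fun r => r.1 == t')
          = ((q :: tl).filter (fun r => !(r.1 == q.1))).filter (fun r => r.1 == t') := by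
        rw [List.filter_filter]
        apply List.filter_congr
        intro r _
        by_cases hrt : (r.1 == t') = true
        · have : (r.1 == q.1) = false := by
            have h1 : r.1 = t' := beq_iff_eq.mp hrt
            have h2 : ¬ t' = q.1 := beq_eq_false_iff_ne.mp ht'ne
            exact beq_eq_false_iff_ne.mpr (fun e => h2 (h1 ▸ e))
          simp [hrt, this]
        · simp [Bool.eq_false_iff.mpr hrt]
      rw [hfil]

theorem pv_getD_foldl_modify_key_filter {ν β : Type} (key : β → String) (d0 : ν) (f : β → ν → ν) :
    ∀ (l : List β) (d : PySem.Dict String ν) (c : String),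
    (l.foldl (fun d x => d.modify (key x) d0 (f x)) d).getD c d0
      = (l.filter (fun x => key x == c)).foldl (fun v x => f x v) (d.getD c d0) := by
  intro l
  induction l with
  | nil => intro d c; rfl
  | cons x tl ih =>
    intro d c
    simp only [List.foldl_cons, List.filter_cons]
    by_cases h : (key x == c) = true
    · have hc : c = key x := (beq_iff_eq.mp h).symm
      rw [ih, h]
      simp [hc]
    · have hc : ¬ c = key x := fun e => h (beq_iff_eq.mpr e.symm)
      rw [ih]
      simp only [h]
      rw [PySem.Dict.getD_modify]
      simp [hc]

theorem pv_main_bridge (key age : List (String × String) → String)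
    (dogs : List (List (String × String))) :
    ((dogs.foldl
        (fun c dog => c.modify (key dog) PySem.Dict.empty
          (fun sub => sub.modify (age dog) 0 (· + 1)))
        PySem.Dict.empty).items.foldl
      (fun acc kv => kv.2.items.foldl (fun a2 jv => a2 ++ [(kv.1, jv.1, jv.2)]) acc) [])
    = pvTypeLoop (dogs.map (fun dog => (key dog, age dog))) [] := by
  set C : PySem.Dict String (PySem.Dict String Int) := dogs.foldl
      (fun c dog => c.modify (key dog) PySem.Dict.empty
        (fun sub => sub.modify (age dog) 0 (· + 1)))
      PySem.Dict.empty with hCdef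
  have hnd : C.keys.Nodup := by
    have h := PySem.Dict.nodup_keys_foldl_modify_key (ν := PySem.Dict String Int) dogs key PySem.Dict.empty
      (fun _ dog sub => sub.modify (age dog) 0 (· + 1)) PySem.Dict.empty
      PySem.Dict.nodup_keys_empty
    rw [hCdef]
    exact h
  have hkeys : C.keys = pvDdp (dogs.map key) := by
    have h := PySem.Dict.keys_foldl_modify_key (ν := PySem.Dict String Int) dogs key PySem.Dict.empty
      (fun _ dog sub => sub.modify (age dog) 0 (· + 1)) PySem.Dict.empty
    have h' : C.keys = PySem.Set.update (PySem.Dict.empty : PySem.Dict String (PySem.Dict String Int)).keys (dogs.map key) := by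
      rw [hCdef]; exact h
    rw [h', PySem.Dict.keys_empty,
      pv_update_eq_ddp (dogs.map key).length (dogs.map key) le_rfl []]
    simp
  have hgetD : ∀ t : String, C.getD t PySem.Dict.empty
      = PySem.Dict.counter ((dogs.filter (fun dog => key dog == t)).map age) := by
    intro t
    have h := pv_getD_foldl_modify_key_filter (ν := PySem.Dict String Int) key PySem.Dict.empty
      (fun dog sub => sub.modify (age dog) 0 (· + 1)) dogs PySem.Dict.empty t
    rw [PySem.Dict.counter_eq_foldl, List.foldl_map, hCdef]
    exact h
  have hitems : C.items = C.keys.map (fun t => (t, C.getD t PySem.Dict.empty)) :=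
    PySem.Dict.items_eq_map_keys C hnd _
  have h1 : C.items.foldl
      (fun acc kv => kv.2.items.foldl (fun a2 jv => a2 ++ [(kv.1, jv.1, jv.2)]) acc) []
      = C.items.flatMap (fun kv => kv.2.items.map (fun jv => (kv.1, jv.1, jv.2))) := by
    have ha := List.foldl_ext (l := C.items)
        (fun acc (kv : String × PySem.Dict String Int) =>
          kv.2.items.foldl (fun a2 jv => a2 ++ [(kv.1, jv.1, jv.2)]) acc)
        (fun acc (kv : String × PySem.Dict String Int) =>
          acc ++ kv.2.items.map (fun jv => (kv.1, jv.1, jv.2))) []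
        (fun acc kv _ => PySem.List.foldl_append_singleton_eq_map _ _ _)
    rw [ha, PySem.List.foldl_append_eq_flatMap]
    simp
  rw [h1, hitems, List.flatMap_map]
  have h2 : ∀ t ∈ C.keys,
      (C.getD t PySem.Dict.empty).items.map (fun jv => (t, jv.1, jv.2))
        = (pvDdp ((dogs.filter (fun dog => key dog == t)).map age)).map
            (fun a => (t, a, (((dogs.filter (fun dog => key dog == t)).map age).count a : Int))) := by
    intro t _
    rw [hgetD t, PySem.Dict.items_counter, List.map_map, pv_ofList_eq_ddp]
    rfl
  rw [pv_flatMap_congr h2]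
  have h3 : pvTypeLoop (dogs.map (fun dog => (key dog, age dog))) []
      = pvAForm (dogs.map (fun dog => (key dog, age dog))) := by
    rw [pvTypeLoop_spec _ _ le_rfl]
    simp
  rw [h3, pvAForm]
  have hfst : (dogs.map (fun dog => (key dog, age dog))).map (·.1) = dogs.map key := by
    rw [List.map_map]
    rfl
  have hflt : ∀ t : String,
      ((dogs.map (fun dog => (key dog, age dog))).filter (fun q => q.1 == t)).map (·.2)
        = (dogs.filter (fun dog => key dog == t)).map age := by
    intro t
    rw [List.filter_map, List.map_map]
    rfl
  rw [hfst, ← hkeys]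
  apply pv_flatMap_congr
  intro t _
  rw [hflt t]

-- ===== VERDICT (by name: the statement is the Claim_ definition above) =====
theorem consolidate_found_canines_spec : Claim_equal_consolidate_found_canines := by
  intro payload _
  unfold Spec_consolidate_found_canines
  unfold consolidate_found_canines consolidate_found_canines_alt
  exact pv_main_bridge (fun dog => pyAGetD dog "type" "Unknown")
    (fun dog => pyAGetD dog "age" "Unknown") (pyAGetD payload "canines" [])
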